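-- pv_equiv track=rewrite | github.com/PythonAndGoCourses2/PythonHomework | final_task/pycalc/pycalc.py | entry
-- ===== SOURCE A (Python) =====
-- def entry(string_input):
--     """Search of operation of comparison in expression."""
--     level_1 = []
--     level_2 = []
--     sep_operation = ['<', '>', '!', '=']
--     for index, element in enumerate(string_input):
--         for sep in sep_operation:
--             if sep == element:
--                 if string_input[index + 1] == '=':
--                     new_operation = sep + string_input[index + 1]
--                     level_1.append(index)
--                     level_2.append(new_operation)
--                 else:
--                     level_1.append(index)
--                     level_2.append(element)
--     res = level_1, level_2
--     return res
-- ===== SOURCE B (Python) =====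
-- def entry(string_input):
--     """Search of operation of comparison in expression."""
--     positions = []
--     for sep in ('<', '>', '!', '='):
--         at = string_input.find(sep)
--         while at != -1:
--             positions.append(at)
--             at = string_input.find(sep, at + 1)
--     positions.sort()
--     level_2 = [string_input[i] + '=' if string_input[i + 1] == '=' else string_input[i]
--                for i in positions]
--     return positions, level_2
-- ===== Notes on version B (the rewrite author's own statement) =====
-- stated objective: faster
-- what changed: Instead of A's character-by-character scan with an inner loop over the four separators, B runs four repeated str.find scans (one per separator character) collecting each separator's occurrence positions, sorts the merged position list, and derives the operator tokens in a final pass over the sorted positions.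
import Mathlib
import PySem

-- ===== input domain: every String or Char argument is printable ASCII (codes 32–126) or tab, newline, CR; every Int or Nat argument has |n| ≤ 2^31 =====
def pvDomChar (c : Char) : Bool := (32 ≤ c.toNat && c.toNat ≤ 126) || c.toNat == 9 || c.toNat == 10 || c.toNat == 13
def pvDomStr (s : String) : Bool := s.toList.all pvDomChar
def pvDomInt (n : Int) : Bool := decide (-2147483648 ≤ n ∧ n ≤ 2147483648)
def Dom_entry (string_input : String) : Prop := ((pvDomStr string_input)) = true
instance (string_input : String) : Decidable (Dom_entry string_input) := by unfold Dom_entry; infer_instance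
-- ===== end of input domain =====

-- B replaces A's single character scan (inner loop over the four separators) by four
-- repeated str.find scans, one per separator, then sorts the merged positions (objective: faster by a constant factor: the scans run in C-level str.find).

-- ===== PORT A =====
def pvSeps : List Char := ['<', '>', '!', '=']

def entry (string_input : String) : List Int × List String :=
  let res :=
    (PySem.List.enumerate string_input.toList).foldl
      (fun (acc : List Int × List String) (p : Int × Char) =>
        pvSeps.foldl (fun acc sep =>
          if sep == p.2 then
            match PySem.Str.pyGet? string_input (p.1 + 1) with
            | some nc =>
              if nc == '=' then
                -- new_operation = sep + string_input[index + 1]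
                (acc.1 ++ [p.1], acc.2 ++ [String.ofList [sep, nc]])
              else
                (acc.1 ++ [p.1], acc.2 ++ [String.ofList [p.2]])
            | none => acc   -- Python raises IndexError here (excluded by Pre_entry)
          else acc) acc)
      (([] : List Int), ([] : List String))
  res

-- ===== PORT B =====
-- the four one-character separator strings, in Python B's tuple order
def pvSepStrs : List String := ["<", ">", "!", "="]

-- 'at = find(sep); while at != -1: append at; at = find(sep, at + 1)' with fuel |s|+1
def pvFindLoop (s : String) (sep : String) : Nat → Int → List Int
  | 0, _ => []
  | fuel + 1, at_ =>
    if at_ == -1 then []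
    else at_ :: pvFindLoop s sep fuel (PySem.Str.findFrom s sep (at_ + 1))

def entry_alt (string_input : String) : List Int × List String :=
  let positions := pvSepStrs.foldl
    (fun acc sep =>
      acc ++ pvFindLoop string_input sep (string_input.length + 1) (PySem.Str.find string_input sep))
    ([] : List Int)
  let positions := PySem.List.sorted positions (fun x => x) false
  let level_2 := positions.map (fun i =>
    match PySem.Str.pyGet? string_input i, PySem.Str.pyGet? string_input (i + 1) with
    | some c, some nc => if nc == '=' then String.ofList [c, nc] else String.ofList [c]
    | some c, none => String.ofList [c]   -- Python raises IndexError here (excluded by Pre_entry)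
    | none, _ => "")                       -- unreachable: every position is a found index
  (positions, level_2)

-- ===== PRECONDITION & SPEC =====
-- Pre_ excludes exactly the inputs whose LAST character is a comparison-separator character:
-- there Python A (and B) raises IndexError on string_input[index + 1].
def Pre_entry (string_input : String) : Prop :=
  string_input.toList.getLastD ' ' ∉ (['<', '>', '!', '='] : List Char)
instance (string_input : String) : Decidable (Pre_entry string_input) := by unfold Pre_entry; infer_instance

def pvWitness_entry : String := "a<=b!=c"

def Spec_entry (string_input : String) (out : List Int × List String) : Prop := out = entry_alt string_input
instance (string_input : String) (out : List Int × List String) : Decidable (Spec_entry string_input out) := by unfold Spec_entry; infer_instance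

-- ===== CLAIM (what is proved, stated in full; the proofs are below) =====
def Claim_equal_entry : Prop := ∀ (string_input : String), Dom_entry string_input → Pre_entry string_input → Spec_entry string_input (entry string_input)

-- ===== LEMMAS AND PROOFS =====

-- the common normal form: indices (with their chars) of the separator occurrences
def pvPairs (l : List Char) : List (Int × Char) :=
  (PySem.List.enumerate l).filter (fun p => pvSeps.contains p.2)

-- per-character occurrence list from position k (what one find-loop computes)
def pvD (l : List Char) (c : Char) (k : Nat) : List Int :=
  ((PySem.List.enumerate (l.drop k) (k : Int)).filter (fun p => p.2 == c)).map (fun p => p.1)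

theorem pvD_step_hit (l : List Char) (c : Char) (k : Nat) (hk : k < l.length)
    (hc : l[k] = c) : pvD l c k = (k : Int) :: pvD l c (k + 1) := by
  unfold pvD
  rw [List.drop_eq_getElem_cons hk, PySem.List.enumerate_cons]
  simp [hc]

theorem pvD_step_miss (l : List Char) (c : Char) (k : Nat) (hk : k < l.length)
    (hc : l[k] ≠ c) : pvD l c k = pvD l c (k + 1) := by
  unfold pvD
  rw [List.drop_eq_getElem_cons hk, PySem.List.enumerate_cons]
  simp [hc]

theorem pvD_past (l : List Char) (c : Char) (k : Nat) (hk : l.length ≤ k) :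
    pvD l c k = [] := by
  unfold pvD
  rw [List.drop_eq_nil_iff.mpr (by omega)]
  simp [PySem.List.enumerate]

theorem pvD_skip (l : List Char) (c : Char) (k m : Nat) (hkm : k ≤ m) (hm : m ≤ l.length)
    (h : ∀ i, k ≤ i → i < m → ∀ (hi : i < l.length), l[i] ≠ c) :
    pvD l c k = pvD l c m := by
  induction m with
  | zero =>
    have hk0 : k = 0 := by omega
    subst hk0; rfl
  | succ n ih =>
    rcases Nat.eq_or_lt_of_le hkm with rfl | hlt
    · rfl
    · have hkn : k ≤ n := by omega
      rw [ih hkn (by omega) (fun i h1 h2 hi => h i h1 (by omega) hi),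
        pvD_step_miss l c n (by omega) (h n hkn (by omega) (by omega))]

-- [c] is a prefix of xs iff xs starts with c
theorem pv_singleton_prefix (c : Char) (xs : List Char) : [c] <+: xs ↔ xs.head? = some c := by
  cases xs with
  | nil => simp
  | cons a t => simp [List.cons_prefix_cons, eq_comm]

-- [c] is contained in xs iff c is a member
theorem pv_singleton_infix (c : Char) (xs : List Char) : [c] <:+: xs ↔ c ∈ xs := by
  constructor
  · intro h; exact h.mem (by simp)
  · intro h; obtain ⟨l1, l2, rfl⟩ := List.mem_iff_append.mp h; exact ⟨l1, l2, by simp⟩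

-- the find loop computes pvD
theorem pvFindLoop_eq (s : String) (c : Char) (fuel k : Nat)
    (hk : k ≤ s.toList.length) (hfuel : s.toList.length + 1 - k ≤ fuel) :
    pvFindLoop s (String.ofList [c]) fuel (PySem.Chars.findFrom s.toList [c] (k : Int) none)
      = pvD s.toList c k := by
  induction fuel generalizing k with
  | zero => omega
  | succ fuel ih =>
    set l := s.toList with hl
    by_cases hr : PySem.Chars.findFrom l [c] (k : Int) none = -1
    · rw [pvFindLoop]
      rw [hr]
      simp only [beq_self_eq_true, if_true]
      have hnot : ¬ [c] <:+: l.drop k :=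
        (PySem.Chars.findFrom_natCast_eq_neg_one_iff l [c] k hk).mp hr
      have hnone : ∀ i, k ≤ i → i < l.length → ∀ (hi : i < l.length), l[i] ≠ c := by
        intro i h1 h2 hi hc
        exact hnot ((pv_singleton_infix c (l.drop k)).mpr
          (by
            have hd : (l.drop k)[i - k]'(by simp; omega) = l[i] := by
              rw [List.getElem_drop]; congr 1; omega
            have hmem : l[i] ∈ l.drop k := by rw [← hd]; exact List.getElem_mem _
            rwa [hc] at hmem))
      rw [pvD_skip l c k l.length hk le_rfl hnone, pvD_past l c l.length le_rfl]
    · obtain ⟨h1, h2, h3⟩ := PySem.Chars.findFrom_natCast_spec l [c] k hk hr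
      set r := PySem.Chars.findFrom l [c] (k : Int) none with hrdef
      have hr0 : 0 ≤ r := le_trans (by positivity) h1
      have hhead : (l.drop r.toNat).head? = some c := (pv_singleton_prefix c _).mp h2
      have hrlen : r.toNat < l.length := by
        by_contra hcon
        rw [List.drop_eq_nil_iff.mpr (by omega)] at hhead
        simp at hhead
      have hgetr : l[r.toNat] = c := by
        have := hhead
        rw [List.head?_drop, List.getElem?_eq_getElem hrlen] at this
        simpa using this
      have hkr : k ≤ r.toNat := by omega
      rw [pvFindLoop]
      have hrne : (r == -1) = false := by simpa using hr
      rw [hrne]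
      simp only [Bool.false_eq_true, if_false]
      have hskip : pvD l c k = pvD l c r.toNat :=
        pvD_skip l c k r.toNat hkr (by omega)
          (fun i hi1 hi2 hi hc => h3 i hi1 hi2
            ((pv_singleton_prefix c _).mpr (by rw [List.head?_drop, List.getElem?_eq_getElem hi, hc])))
      rw [hskip, pvD_step_hit l c r.toNat hrlen hgetr]
      have hcast : r + 1 = ((r.toNat + 1 : Nat) : Int) := by omega
      have hfe : PySem.Str.findFrom s (String.ofList [c]) (r + 1) none
          = PySem.Chars.findFrom l [c] ((r.toNat + 1 : Nat) : Int) none := by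
        rw [PySem.Str.findFrom_eq, hcast]
        simp [hl]
      rw [hfe, ih (r.toNat + 1) (by omega) (by omega)]
      have : (r.toNat : Int) = r := by omega
      rw [this]

-- pvD at position 0 is the plain per-character filter of the enumeration
theorem pvD_zero (l : List Char) (c : Char) :
    pvD l c 0 = ((PySem.List.enumerate l).filter (fun p => p.2 == c)).map (fun p => p.1) := by
  unfold pvD
  simp

-- the four disjoint per-character filters together are a rearrangement of the membership filter
theorem pv_perm (E : List (Int × Char)) :
    ((E.filter (fun p => p.2 == '<') ++ E.filter (fun p => p.2 == '>'))
      ++ E.filter (fun p => p.2 == '!') ++ E.filter (fun p => p.2 == '=')).Perm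
    (E.filter (fun p => pvSeps.contains p.2)) := by
  induction E with
  | nil => simp
  | cons p E ih =>
    by_cases h : pvSeps.contains p.2 = true
    · have hmem : p.2 = '<' ∨ p.2 = '>' ∨ p.2 = '!' ∨ p.2 = '=' := by
        simpa [pvSeps] using h
      rw [show List.filter (fun p => pvSeps.contains p.2) (p :: E)
            = p :: List.filter (fun p => pvSeps.contains p.2) E by
          rw [List.filter_cons, if_pos h]]
      refine List.Perm.trans ?_ (ih.cons p)
      rcases hmem with h1 | h1 | h1 | h1 <;>
        · simp only [List.filter_cons, h1, beq_self_eq_true, if_true,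
            (by decide : (('<':Char) == '>') = false), (by decide : (('<':Char) == '!') = false),
            (by decide : (('<':Char) == '=') = false), (by decide : (('>':Char) == '<') = false),
            (by decide : (('>':Char) == '!') = false), (by decide : (('>':Char) == '=') = false),
            (by decide : (('!':Char) == '<') = false), (by decide : (('!':Char) == '>') = false),
            (by decide : (('!':Char) == '=') = false), (by decide : (('=':Char) == '<') = false),
            (by decide : (('=':Char) == '>') = false), (by decide : (('=':Char) == '!') = false),
            Bool.false_eq_true, if_false]
          refine List.perm_iff_count.mpr (fun a => ?_)
          simp only [List.count_append, List.count_cons]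
          omega
    · have h' : pvSeps.contains p.2 = false := by simpa using h
      have hne : ∀ c, c ∈ pvSeps → (p.2 == c) = false := by
        intro c hc
        simp only [List.contains_eq_mem, decide_eq_true_eq] at h
        simp only [beq_eq_false_iff_ne, ne_eq]
        intro hq; exact h (hq ▸ hc)
      simp only [List.filter_cons, h',
        hne '<' (by decide), hne '>' (by decide), hne '!' (by decide), hne '=' (by decide),
        Bool.false_eq_true, if_false]
      exact ih

-- merging the four per-character lists and sorting gives the index-ordered pairs' indices
theorem pv_positions (s : String) :
    PySem.List.sorted
      (pvSepStrs.foldl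
        (fun acc sep =>
          acc ++ pvFindLoop s sep (s.length + 1) (PySem.Str.find s sep))
        ([] : List Int)) (fun x => x) false
    = (pvPairs s.toList).map (fun p => p.1) := by
  have hlen : s.toList.length ≤ s.length := by simp
  have hone : ∀ c : Char, pvFindLoop s (String.ofList [c]) (s.length + 1) (PySem.Str.find s (String.ofList [c]))
      = pvD s.toList c 0 := by
    intro c
    have h := pvFindLoop_eq s c (s.length + 1) 0 (by omega) (by omega)
    rw [PySem.Str.find_eq]
    simpa [PySem.Chars.findFrom_zero] using h
  simp only [pvSepStrs, List.foldl_cons, List.foldl_nil, List.nil_append]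
  rw [show ("<" : String) = String.ofList ['<'] from rfl,
      show (">" : String) = String.ofList ['>'] from rfl,
      show ("!" : String) = String.ofList ['!'] from rfl,
      show ("=" : String) = String.ofList ['='] from rfl,
      hone '<', hone '>', hone '!', hone '=']
  simp only [pvD_zero]
  rw [← List.map_append, ← List.map_append, ← List.map_append]
  exact PySem.List.sorted_eq_of_perm_of_pairwise_lt _ _ _
    ((pv_perm (PySem.List.enumerate s.toList)).map (fun p => p.1)).symm
    (((PySem.List.pairwise_lt_enumerate s.toList 0).filter _).map _ (fun _ _ h => h))

-- ===== A-side: the fold equals the normal form =====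
set_option maxHeartbeats 1000000 in
theorem pv_inner (s : String) (acc : List Int × List String) (p : Int × Char) :
    pvSeps.foldl (fun acc sep =>
      if sep == p.2 then
        match PySem.Str.pyGet? s (p.1 + 1) with
        | some nc =>
          if nc == '=' then (acc.1 ++ [p.1], acc.2 ++ [String.ofList [sep, nc]])
          else (acc.1 ++ [p.1], acc.2 ++ [String.ofList [p.2]])
        | none => acc
      else acc) acc
    = if pvSeps.contains p.2 then
        match PySem.Str.pyGet? s (p.1 + 1) with
        | some nc => (acc.1 ++ [p.1],
            acc.2 ++ [if nc == '=' then String.ofList [p.2, nc] else String.ofList [p.2]])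
        | none => acc
      else acc := by
  obtain ⟨i, c⟩ := p
  rcases hg : PySem.Str.pyGet? s (i + 1) with _ | nc <;>
    by_cases h1 : ('<' == c) = true <;> by_cases h2 : ('>' == c) = true <;>
      by_cases h3 : ('!' == c) = true <;> by_cases h4 : ('=' == c) = true <;>
        simp_all [pvSeps, List.foldl] <;>
          first
            | tauto
            | (subst_vars; simp_all; done)
            | (subst_vars; done)
            | (subst_vars; rcases Decidable.em (nc = '=') with hq | hq <;> simp [hq])

theorem pv_fold (s : String) (l : List (Int × Char)) (acc : List Int × List String)
    (h : ∀ p ∈ l, pvSeps.contains p.2 → (PySem.Str.pyGet? s (p.1 + 1)).isSome) :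
    l.foldl
      (fun (acc : List Int × List String) (p : Int × Char) =>
        pvSeps.foldl (fun acc sep =>
          if sep == p.2 then
            match PySem.Str.pyGet? s (p.1 + 1) with
            | some nc =>
              if nc == '=' then (acc.1 ++ [p.1], acc.2 ++ [String.ofList [sep, nc]])
              else (acc.1 ++ [p.1], acc.2 ++ [String.ofList [p.2]])
            | none => acc
          else acc) acc) acc
    = (acc.1 ++ (l.filter (fun p => pvSeps.contains p.2)).map (fun p => p.1),
       acc.2 ++ (l.filter (fun p => pvSeps.contains p.2)).map (fun p =>
         match PySem.Str.pyGet? s (p.1 + 1) with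
         | some nc => if nc == '=' then String.ofList [p.2, nc] else String.ofList [p.2]
         | none => String.ofList [p.2])) := by
  induction l generalizing acc with
  | nil => simp
  | cons p l ih =>
    rw [List.foldl_cons, pv_inner]
    by_cases hc : pvSeps.contains p.2 = true
    · obtain ⟨nc, hnc⟩ := Option.isSome_iff_exists.mp (h p (by simp) hc)
      rw [if_pos hc, hnc, ih _ (fun q hq => h q (by simp [hq]))]
      have hmem : p.2 ∈ pvSeps := by simpa [List.contains_eq_mem] using hc
      have hnc' : PySem.List.pyGet? s.toList (p.1 + 1) = some nc := by
        simpa using hnc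
      simp [hmem, hnc']
    · rw [if_neg hc, ih _ (fun q hq => h q (by simp [hq]))]
      have hmem : p.2 ∉ pvSeps := by simpa [List.contains_eq_mem] using hc
      simp [hmem]

theorem pv_safe (s : String) (hpre : Pre_entry s) :
    ∀ p ∈ PySem.List.enumerate s.toList, pvSeps.contains p.2 = true →
      (PySem.Str.pyGet? s (p.1 + 1)).isSome := by
  intro p hp hc
  obtain ⟨k, hk, rfl⟩ := (PySem.List.mem_enumerate_iff s.toList 0 p).mp hp
  simp only [zero_add]
  have hne : k + 1 ≠ s.toList.length := by
    intro hEq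
    have hne' : s.toList ≠ [] := by
      intro h0; rw [h0] at hk; simp at hk
    have hlast : s.toList.getLastD ' ' = s.toList[k] := by
      rw [List.getLastD_eq_getLast?, List.getLast?_eq_getElem?,
        List.getElem?_eq_getElem (by omega : s.toList.length - 1 < s.toList.length)]
      simp only [Option.getD_some]
      congr 1
      omega
    unfold Pre_entry at hpre
    rw [hlast] at hpre
    simp only [pvSeps, List.contains_eq_mem, decide_eq_true_eq] at hc
    exact hpre hc
  have hcast : ((k : Int) + 1) = ((k + 1 : Nat) : Int) := by push_cast; ring
  rw [hcast, PySem.Str.pyGet?_natCast]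
  simp only [Option.isSome_iff_exists, List.getElem?_eq_some_iff]
  exact ⟨s.toList[k + 1]'(by omega), by omega, rfl⟩

-- B's token map over the indices equals A's token map over the pairs
theorem pv_tokens (s : String) :
    ((pvPairs s.toList).map (fun p => p.1)).map (fun i =>
      match PySem.Str.pyGet? s i, PySem.Str.pyGet? s (i + 1) with
      | some c, some nc => if nc == '=' then String.ofList [c, nc] else String.ofList [c]
      | some c, none => String.ofList [c]
      | none, _ => "")
    = (pvPairs s.toList).map (fun p =>
        match PySem.Str.pyGet? s (p.1 + 1) with
        | some nc => if nc == '=' then String.ofList [p.2, nc] else String.ofList [p.2]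
        | none => String.ofList [p.2]) := by
  rw [List.map_map]
  refine List.map_congr_left (fun p hp => ?_)
  have hp' : p ∈ PySem.List.enumerate s.toList 0 := List.mem_of_mem_filter hp
  obtain ⟨j, hj, rfl⟩ := (PySem.List.mem_enumerate_iff s.toList 0 p).mp hp'
  have hg : PySem.Str.pyGet? s ((0 : Int) + (j : Int)) = some s.toList[j] := by
    rw [zero_add, PySem.Str.pyGet?_natCast, List.getElem?_eq_getElem hj]
  simp only [Function.comp_apply, hg]
  rcases PySem.Str.pyGet? s ((0 : Int) + (j : Int) + 1) with _ | nc <;> simp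

-- ===== VERDICT (by name: the statement is the Claim_ definition above) =====
theorem entry_spec : Claim_equal_entry := by
  intro s _ hpre
  unfold Spec_entry entry entry_alt
  simp only []
  rw [pv_fold s _ _ (pv_safe s hpre), pv_positions, pv_tokens]
  rfl
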